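-- pv_equiv track=rewrite | github.com/moliveri1618/TD_MatchPDF_backend | TD_MatchPDF_backend_project/utils.py | extract_word
-- ===== SOURCE A (Python) =====
-- def extract_word(input_string):
--     number_start_index = None
--     for i, char in enumerate(reversed(input_string)):
--         if not char.isdigit():
--             number_start_index = len(input_string) - i
--             break
--
--     if number_start_index is None:
--         return ''  # The string consists only of digits
--     else:
--         word_part = input_string[:number_start_index]
--         return word_part if word_part and not word_part.isdigit() else None
-- ===== SOURCE B (Python) =====
-- def extract_word(input_string):
--     cut = 0
--     for i, ch in enumerate(input_string):
--         if not ch.isdigit():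
--             cut = i + 1
--     return input_string[:cut]
-- ===== Notes on version B (the rewrite author's own statement) =====
-- stated objective: simpler
-- what changed: Replaces the reverse scan with early break plus a conditional None branch by a single forward pass that records the position just after the last non-digit character and returns that prefix (A's None branch is unreachable, so the guard disappears).
import Mathlib
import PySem

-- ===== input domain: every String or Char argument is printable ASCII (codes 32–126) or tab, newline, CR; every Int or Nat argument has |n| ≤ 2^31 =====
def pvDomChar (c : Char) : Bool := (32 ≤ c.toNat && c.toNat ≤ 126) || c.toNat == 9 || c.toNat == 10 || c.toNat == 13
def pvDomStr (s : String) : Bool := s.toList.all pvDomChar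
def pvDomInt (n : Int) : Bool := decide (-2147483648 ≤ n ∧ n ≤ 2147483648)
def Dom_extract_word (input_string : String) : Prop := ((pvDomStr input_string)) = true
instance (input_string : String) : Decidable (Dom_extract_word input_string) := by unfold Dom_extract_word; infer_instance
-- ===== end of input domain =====

-- B replaces A's reverse scan with early break (and a None guard that can never fire)
-- by one forward pass recording the position just after the last non-digit character; objective: simpler.

-- ===== PORT A =====
-- the 'for i, char in enumerate(reversed(input_string)): if not char.isdigit(): … break' loop
def pvAloop (len : Int) (i : Int) : List Char → Option Int
  | [] => none
  | c :: rest => if !(PySem.Chars.isdigit c) then some (len - i) else pvAloop len (i + 1) rest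

def extract_word (input_string : String) : Option String :=
  let cs := input_string.toList
  match pvAloop cs.length 0 cs.reverse with
  | none => some ""                                   -- the string consists only of digits
  | some n =>
    let word_part := PySem.List.slice cs none (some n)    -- input_string[:number_start_index]
    if !word_part.isEmpty && !(PySem.Chars.strIsdigit word_part)
    then some (String.ofList word_part) else none

-- ===== PORT B =====
def extract_word_alt (input_string : String) : Option String :=
  let cs := input_string.toList
  let cut : Int := (PySem.List.enumerate cs).foldl
    (fun cut p => if !(PySem.Chars.isdigit p.2) then p.1 + 1 else cut) 0
  some (String.ofList (PySem.List.slice cs none (some cut)))      -- input_string[:cut]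

-- ===== PRECONDITION & SPEC =====
def Spec_extract_word (input_string : String) (out : Option String) : Prop := out = extract_word_alt input_string
instance (input_string : String) (out : Option String) : Decidable (Spec_extract_word input_string out) := by unfold Spec_extract_word; infer_instance

-- ===== CLAIM (what is proved, stated in full; the proofs are below) =====
def Claim_equal_extract_word : Prop := ∀ (input_string : String), Dom_extract_word input_string → Spec_extract_word input_string (extract_word input_string)

-- ===== LEMMAS AND PROOFS =====

-- B's cut value as a function of the character list
def pvCut (cs : List Char) : Int :=
  (PySem.List.enumerate cs).foldl
    (fun cut p => if !(PySem.Chars.isdigit p.2) then p.1 + 1 else cut) 0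

theorem pvCut_append (l : List Char) (c : Char) :
    pvCut (l ++ [c]) = if !(PySem.Chars.isdigit c) then (l.length : Int) + 1 else pvCut l := by
  simp [pvCut, PySem.List.enumerate_append, PySem.List.enumerate]

theorem pvCut_bounds (l : List Char) : 0 ≤ pvCut l ∧ pvCut l ≤ l.length := by
  induction l using List.reverseRecOn with
  | nil => simp [pvCut, PySem.List.enumerate]
  | append_singleton l c ih =>
    rw [pvCut_append]
    by_cases h : PySem.Chars.isdigit c <;> simp [h] <;> omega

-- in A's loop only len - i matters
theorem pvAloop_shift (r : List Char) : ∀ (len i : Int),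
    pvAloop len (i + 1) r = pvAloop (len - 1) i r := by
  induction r with
  | nil => intro len i; rfl
  | cons c rest ih =>
    intro len i
    by_cases h : PySem.Chars.isdigit c
    · simp only [pvAloop, if_neg (by simp [h] : ¬(!(PySem.Chars.isdigit c)) = true)]
      exact ih len (i + 1)
    · simp only [pvAloop, if_pos (by simp [h] : (!(PySem.Chars.isdigit c)) = true)]
      congr 1
      ring

theorem pvAloop_some_bounds (r : List Char) : ∀ (len i n : Int),
    pvAloop len i r = some n → len - i - r.length < n ∧ n ≤ len - i := by
  induction r with
  | nil => intro len i n h; simp [pvAloop] at h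
  | cons c rest ih =>
    intro len i n h
    by_cases hc : PySem.Chars.isdigit c
    · simp [pvAloop, hc] at h
      have := ih len (i + 1) n h
      simp [List.length_cons]
      omega
    · simp [pvAloop, hc] at h
      simp [List.length_cons]
      omega

theorem pv_core_eq (cs : List Char) :
    (match pvAloop cs.length 0 cs.reverse with
     | none => some ""
     | some n =>
       let word_part := PySem.List.slice cs none (some n)
       if !word_part.isEmpty && !(PySem.Chars.strIsdigit word_part)
       then some (String.ofList word_part) else none)
    = some (String.ofList (PySem.List.slice cs none (some (pvCut cs)))) := by
  induction cs using List.reverseRecOn with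
  | nil => decide
  | append_singleton l c ih =>
    have hlen : ((l ++ [c]).length : Int) = (l.length : Int) + 1 := by simp
    have hrev : (l ++ [c]).reverse = c :: l.reverse := by simp
    by_cases h : PySem.Chars.isdigit c
    · -- trailing digit: both sides reduce to the value on l
      have hloop : pvAloop ((l ++ [c]).length : Int) 0 (l ++ [c]).reverse
          = pvAloop (l.length : Int) 0 l.reverse := by
        rw [hrev, hlen]
        show (if !(PySem.Chars.isdigit c) then some (((l.length : Int) + 1) - 0)
              else pvAloop ((l.length : Int) + 1) (0 + 1) l.reverse)
            = pvAloop (l.length : Int) 0 l.reverse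
        rw [if_neg (by simp [h])]
        rw [show (0 : Int) + 1 = 0 + 1 from rfl, pvAloop_shift]
        norm_num
      rw [hloop]
      have hcut : pvCut (l ++ [c]) = pvCut l := by
        rw [pvCut_append, if_neg (by simp [h])]
      rw [hcut]
      -- the slices over l ++ [c] agree with the slices over l (indices stay ≤ l.length)
      rcases pvCut_bounds l with ⟨hc0, hc1⟩
      have hsliceB : PySem.List.slice (l ++ [c]) none (some (pvCut l))
          = PySem.List.slice l none (some (pvCut l)) := by
        rw [PySem.List.slice_to _ hc0, PySem.List.slice_to _ hc0,
            List.take_append_of_le_length (by omega)]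
      rw [hsliceB]
      cases hA : pvAloop (l.length : Int) 0 l.reverse with
      | none => rw [hA] at ih; exact ih
      | some n =>
        rcases pvAloop_some_bounds l.reverse (l.length : Int) 0 n hA with ⟨hn0, hn1⟩
        simp only [List.length_reverse] at hn0
        have hsliceA : PySem.List.slice (l ++ [c]) none (some n)
            = PySem.List.slice l none (some n) := by
          rw [PySem.List.slice_to _ (by omega), PySem.List.slice_to _ (by omega),
              List.take_append_of_le_length (by omega)]
        rw [hA] at ih
        simpa [hsliceA] using ih
    · -- trailing non-digit: A returns the whole string, B's cut is the full length
      have hloop : pvAloop ((l ++ [c]).length : Int) 0 (l ++ [c]).reverse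
          = some ((l.length : Int) + 1) := by
        rw [hrev, hlen]
        show (if !(PySem.Chars.isdigit c) then some (((l.length : Int) + 1) - 0)
              else pvAloop ((l.length : Int) + 1) (0 + 1) l.reverse)
            = some ((l.length : Int) + 1)
        rw [if_pos (by simp [h])]
        norm_num
      have hcut : pvCut (l ++ [c]) = (l.length : Int) + 1 := by
        rw [pvCut_append, if_pos (by simp [h])]
      have hslice : PySem.List.slice (l ++ [c]) none (some ((l.length : Int) + 1))
          = l ++ [c] := by
        rw [show ((l.length : Int) + 1) = (((l.length + 1 : Nat)) : Int) by push_cast; ring,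
            PySem.List.slice_to_natCast]
        exact List.take_of_length_le (by simp)
      rw [hloop, hcut]
      simp only [hslice]
      rw [if_pos]
      simp [PySem.Chars.strIsdigit, h]

theorem extract_word_spec : Claim_equal_extract_word := by
  intro s _
  show extract_word s = extract_word_alt s
  simp only [extract_word, extract_word_alt]
  exact pv_core_eq s.toList
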